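-- pv_equiv track=rewrite | github.com/Vhivi/ScheduleOptimization | backend/app.py | split_into_weeks
-- ===== SOURCE A (Python) =====
-- def split_into_weeks(week_schedule):
--     # Divide the list of days into calendar weeks (Monday to Sunday)
--     weeks = []
--     current_week = []
--
--     for day in week_schedule:
--         # Add the day to the current week
--         current_week.append(day)
--
--         # If the day is a Sunday or the last day of the schedule, end the week
--         day_name = day.split(" ")[0]  # Extract the name of the day (e.g. Lun.)
--         if day_name == "Dim." or day == week_schedule[-1]:  # Sunday or last day
--             weeks.append(current_week)
--             current_week = []
--
--     return weeks
-- ===== SOURCE B (Python) =====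
-- def split_into_weeks(week_schedule):
--     if not week_schedule:
--         return []
--     last = week_schedule[-1]
--     breaks = [i for i, day in enumerate(week_schedule)
--               if day.split(" ")[0] == "Dim." or day == last]
--     weeks = []
--     prev = 0
--     for b in breaks:
--         weeks.append(week_schedule[prev:b + 1])
--         prev = b + 1
--     return weeks
-- ===== Notes on version B (the rewrite author's own statement) =====
-- stated objective: alternative
-- what changed: B replaces A's single fold that incrementally appends days to a current-week accumulator with a two-pass index-based decomposition: collect the break indices (Sunday or value-equal to the last day) and then slice the schedule between consecutive breaks.
import Mathlib
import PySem

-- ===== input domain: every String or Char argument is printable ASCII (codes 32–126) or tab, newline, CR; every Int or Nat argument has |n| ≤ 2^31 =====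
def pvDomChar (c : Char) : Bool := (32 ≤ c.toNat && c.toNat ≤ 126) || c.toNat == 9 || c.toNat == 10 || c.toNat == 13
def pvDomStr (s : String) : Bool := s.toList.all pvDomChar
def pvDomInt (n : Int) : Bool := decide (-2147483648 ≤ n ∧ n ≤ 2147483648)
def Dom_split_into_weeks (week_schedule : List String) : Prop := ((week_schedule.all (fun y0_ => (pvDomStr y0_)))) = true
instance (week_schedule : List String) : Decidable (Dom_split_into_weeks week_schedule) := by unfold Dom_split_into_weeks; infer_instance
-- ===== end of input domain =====

-- B replaces A's incremental week accumulator with an index-collection pass followed by slicing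
-- at the collected break points (objective: alternative decomposition, same cost).

-- ===== PORT A =====
-- literal port of A: one fold carrying (weeks, current_week); the break test compares the
-- day name with "Dim." and the day with week_schedule[-1] (a VALUE comparison, as in Python)
def split_into_weeks (week_schedule : List String) : List (List String) :=
  (week_schedule.foldl
    (fun (st : List (List String) × List String) day =>
      let current_week := st.2 ++ [day]
      let day_name := (PySem.Str.split? day " ").bind (fun ps => PySem.List.pyGet? ps 0)
      if day_name = some "Dim." ∨ PySem.List.pyGet? week_schedule (-1) = some day
      then (st.1 ++ [current_week], ([] : List String))
      else (st.1, current_week))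
    ([], [])).1

-- ===== PORT B =====
-- port of Source B: empty guard, then collect break indices, then fold slices between them
def split_into_weeks_alt (week_schedule : List String) : List (List String) :=
  match PySem.List.pyGet? week_schedule (-1) with
  | none => []
  | some last =>
    let breaks : List Int :=
      (PySem.List.enumerate week_schedule 0).filterMap
        (fun p =>
          if (PySem.Str.split? p.2 " ").bind (fun ps => PySem.List.pyGet? ps 0) = some "Dim."
             ∨ p.2 = last
          then some p.1 else none)
    (breaks.foldl
      (fun (st : List (List String) × Int) b =>
        (st.1 ++ [PySem.List.slice week_schedule (some st.2) (some (b + 1))], b + 1))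
      ([], 0)).1

-- ===== PRECONDITION & SPEC =====
def Spec_split_into_weeks (week_schedule : List String) (out : List (List String)) : Prop := out = split_into_weeks_alt week_schedule
instance (week_schedule : List String) (out : List (List String)) : Decidable (Spec_split_into_weeks week_schedule out) := by unfold Spec_split_into_weeks; infer_instance

-- ===== CLAIM (what is proved, stated in full; the proofs are below) =====
def Claim_equal_split_into_weeks : Prop := ∀ (week_schedule : List String), Dom_split_into_weeks week_schedule → Spec_split_into_weeks week_schedule (split_into_weeks week_schedule)

-- ===== LEMMAS AND PROOFS =====

-- common characterisation: split at the days satisfying q, dropping an unfinished tail chunk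
def chunksP (q : String → Prop) [DecidablePred q] : List String → List String → List (List String)
  | _, [] => []
  | cur, d :: ds => if q d then (cur ++ [d]) :: chunksP q [] ds else chunksP q (cur ++ [d]) ds

theorem chunksP_congr (q q' : String → Prop) [DecidablePred q] [DecidablePred q']
    (h : ∀ d, q d ↔ q' d) :
    ∀ (xs cur : List String), chunksP q cur xs = chunksP q' cur xs := by
  intro xs
  induction xs with
  | nil => intro cur; rfl
  | cons d ds ih =>
    intro cur
    by_cases hd : q d
    · rw [chunksP, chunksP, if_pos hd, if_pos ((h d).mp hd), ih]
    · rw [chunksP, chunksP, if_neg hd, if_neg (fun hq' => hd ((h d).mpr hq')), ih]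

theorem foldA (q : String → Prop) [DecidablePred q] :
    ∀ (xs : List String) (weeks : List (List String)) (cur : List String),
      (xs.foldl
        (fun (st : List (List String) × List String) day =>
          let current_week := st.2 ++ [day]
          if q day then (st.1 ++ [current_week], ([] : List String)) else (st.1, current_week))
        (weeks, cur)).1
      = weeks ++ chunksP q cur xs := by
  intro xs
  induction xs with
  | nil => intro weeks cur; simp [chunksP]
  | cons d ds ih =>
    intro weeks cur
    rw [List.foldl_cons]
    show (ds.foldl _ (if q d then (weeks ++ [cur ++ [d]], ([] : List String)) else (weeks, cur ++ [d]))).1 = _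
    by_cases hd : q d
    · rw [if_pos hd, ih, chunksP, if_pos hd]; simp
    · rw [if_neg hd, ih, chunksP, if_neg hd]

theorem foldB (q : String → Prop) [DecidablePred q] (ws : List String) :
    ∀ (xs : List String) (k prev : Nat) (weeks : List (List String)),
      xs = ws.drop k → prev ≤ k →
      (((PySem.List.enumerate xs (k : Int)).filterMap
          (fun p => if q p.2 then some p.1 else none)).foldl
        (fun (st : List (List String) × Int) b =>
          (st.1 ++ [PySem.List.slice ws (some st.2) (some (b + 1))], b + 1))
        (weeks, (prev : Int))).1
      = weeks ++ chunksP q ((ws.drop prev).take (k - prev)) xs := by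
  intro xs
  induction xs with
  | nil => intro k prev weeks _ _; simp [PySem.List.enumerate, chunksP]
  | cons d ds ih =>
    intro k prev weeks hxs hpk
    have hget : ws[k]? = some d := by
      have : (ws.drop k)[0]? = some d := by rw [← hxs]; rfl
      simpa [List.getElem?_drop] using this
    have hds : ds = ws.drop (k + 1) := by
      have h1 := congrArg List.tail hxs
      simpa [List.tail_drop] using h1
    have htake : ∀ p : Nat, p ≤ k →
        (ws.drop p).take (k + 1 - p) = (ws.drop p).take (k - p) ++ [d] := by
      intro p hp
      have hk : k + 1 - p = (k - p) + 1 := by omega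
      rw [hk, List.take_add_one]
      have : (ws.drop p)[k - p]? = some d := by
        rw [List.getElem?_drop]
        have : p + (k - p) = k := by omega
        rw [this]; exact hget
      simp [this]
    rw [PySem.List.enumerate_cons]
    by_cases hd : q d
    · have hcast : (k : Int) + 1 = ((k + 1 : Nat) : Int) := by push_cast; ring
      simp only [List.filterMap_cons, hd, if_pos, List.foldl_cons, hcast]
      rw [ih (k + 1) (k + 1) _ hds (le_refl _), PySem.List.slice_natCast, htake prev hpk,
          chunksP, if_pos hd]
      simp
    · have hcast : (k : Int) + 1 = ((k + 1 : Nat) : Int) := by push_cast; ring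
      simp only [List.filterMap_cons, hd, if_false, hcast]
      rw [ih (k + 1) prev _ hds (by omega)]
      simp [chunksP, hd, htake prev hpk]

-- ===== VERDICT (by name: the statement is the Claim_ definition above) =====
theorem split_into_weeks_spec : Claim_equal_split_into_weeks := by
  intro ws _
  unfold Spec_split_into_weeks split_into_weeks split_into_weeks_alt
  cases hlast : PySem.List.pyGet? ws (-1) with
  | none =>
    have : ws = [] := by
      rw [PySem.List.pyGet?_neg_one] at hlast
      exact List.getLast?_eq_none_iff.mp hlast
    subst this; rfl
  | some last =>
    have hA := foldA (fun day =>
      (PySem.Str.split? day " ").bind (fun ps => PySem.List.pyGet? ps 0) = some "Dim."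
        ∨ (some last : Option String) = some day) ws [] []
    have hB := foldB (fun day =>
      (PySem.Str.split? day " ").bind (fun ps => PySem.List.pyGet? ps 0) = some "Dim."
        ∨ day = last) ws ws 0 0 [] (by simp) (le_refl 0)
    simp only [Nat.cast_zero, Nat.sub_zero, List.drop_zero, List.take_zero,
      List.nil_append] at hA hB
    refine hA.trans ?_
    exact (chunksP_congr _ _ (by intro d; simp [eq_comm]) ws []).trans hB.symm
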